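-- pv_equiv track=rewrite | github.com/GautamBharte/SmartAttend | backend/app/whatsapp.py | truncate_name_list
-- ===== SOURCE A (Python) =====
-- def truncate_name_list(names: list[str], max_chars: int = 900) -> str:
--     """Join names with commas, truncating with '… and X more' if over max_chars.
--     WhatsApp template param limit is 1024 chars — we use 900 for safety margin.
--     """
--     if not names:
--         return "None"
--     result = names[0]
--     for i, name in enumerate(names[1:], start=2):
--         candidate = f"{result}, {name}"
--         if len(candidate) > max_chars:
--             remaining = len(names) - (i - 1)
--             return f"{result} … and {remaining} more"
--         result = candidate
--     return result
-- ===== SOURCE B (Python) =====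
-- def truncate_name_list(names: list[str], max_chars: int = 900) -> str:
--     """Length-counting pass + single join, instead of A's incremental string building."""
--     if not names:
--         return "None"
--     total = len(names[0])
--     m = 0
--     for i in range(1, len(names)):
--         total += 2 + len(names[i])
--         if total > max_chars:
--             break
--         m = i
--     if m == len(names) - 1:
--         return ", ".join(names)
--     return ", ".join(names[:m + 1]) + f" … and {len(names) - m - 1} more"
-- ===== Notes on version B (the rewrite author's own statement) =====
-- stated objective: alternative
-- what changed: B replaces A's loop that repeatedly rebuilds the growing joined string and length-checks each candidate by a length-only arithmetic pass that finds the cutoff index, followed by a single ', '.join over a slice.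
import Mathlib
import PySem

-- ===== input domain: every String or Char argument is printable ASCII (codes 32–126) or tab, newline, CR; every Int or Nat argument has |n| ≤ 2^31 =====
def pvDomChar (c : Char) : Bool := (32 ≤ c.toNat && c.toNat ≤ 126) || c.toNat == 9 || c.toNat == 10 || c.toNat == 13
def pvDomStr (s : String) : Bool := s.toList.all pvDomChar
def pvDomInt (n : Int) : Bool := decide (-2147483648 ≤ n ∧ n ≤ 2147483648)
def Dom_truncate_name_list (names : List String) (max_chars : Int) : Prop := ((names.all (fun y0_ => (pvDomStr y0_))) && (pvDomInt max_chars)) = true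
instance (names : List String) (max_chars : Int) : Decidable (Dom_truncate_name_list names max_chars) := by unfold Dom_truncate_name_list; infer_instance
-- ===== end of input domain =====

-- B replaces A's incremental string-building loop by a length-only counting pass that
-- finds the cutoff index, followed by a single join over a slice (objective: alternative).

-- ===== PORT A =====
-- A's loop: rebuild the joined string each step, return early with the '… and X more'
-- suffix when the candidate exceeds max_chars; remaining = length of the unconsumed tail.
def tnlLoopA (max_chars : Int) : List Char → List String → List Char
  | result, [] => result
  | result, name :: rest =>
    let candidate := result ++ [',', ' '] ++ name.toList
    if (candidate.length : Int) > max_chars then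
      result ++ " … and ".toList ++ PySem.Int.toChars ((rest.length : Int) + 1) ++ " more".toList
    else tnlLoopA max_chars candidate rest

def truncate_name_list (names : List String) (max_chars : Int) : String :=
  match names with
  | [] => "None"
  | n0 :: rest => String.ofList (tnlLoopA max_chars n0.toList rest)

-- ===== PORT B =====
-- B's counting pass: m = index of the last name kept (names[0] always kept).
def tnlCut (max_chars : Int) : Int → Nat → List String → Nat
  | _, m, [] => m
  | total, m, name :: rest =>
    let total' := total + 2 + (name.toList.length : Int)
    if total' > max_chars then m else tnlCut max_chars total' (m + 1) rest

def truncate_name_list_alt (names : List String) (max_chars : Int) : String :=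
  match names with
  | [] => "None"
  | n0 :: rest =>
    let m := tnlCut max_chars (n0.toList.length : Int) 0 rest
    if m = rest.length then
      String.ofList (PySem.Chars.join [',', ' '] (names.map String.toList))
    else
      String.ofList (PySem.Chars.join [',', ' '] ((names.take (m + 1)).map String.toList)
        ++ " … and ".toList ++ PySem.Int.toChars ((rest.length : Int) - m) ++ " more".toList)

-- ===== PRECONDITION & SPEC =====
def Spec_truncate_name_list (names : List String) (max_chars : Int) (out : String) : Prop := out = truncate_name_list_alt names max_chars
instance (names : List String) (max_chars : Int) (out : String) : Decidable (Spec_truncate_name_list names max_chars out) := by unfold Spec_truncate_name_list; infer_instance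

-- ===== CLAIM (what is proved, stated in full; the proofs are below) =====
def Claim_equal_truncate_name_list : Prop := ∀ (names : List String) (max_chars : Int), Dom_truncate_name_list names max_chars → Spec_truncate_name_list names max_chars (truncate_name_list names max_chars)

-- ===== LEMMAS AND PROOFS =====

-- the characters the separator contributes to the join, per name after the first
def tnlFlat (xs : List String) : List Char := xs.flatMap (fun n => [',', ' '] ++ n.toList)

theorem tnl_join_eq (xs : List String) : ∀ (p : List Char),
    PySem.Chars.join [',', ' '] (p :: xs.map String.toList) = p ++ tnlFlat xs := by
  induction xs with
  | nil => intro p; simp [PySem.Chars.join_singleton, tnlFlat]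
  | cons x xs ih =>
    intro p
    simp only [List.map_cons, PySem.Chars.join_cons_cons, ih, tnlFlat, List.flatMap_cons]
    simp

theorem tnlCut_shift (max_chars : Int) : ∀ (rest : List String) (t : Int) (m : Nat),
    tnlCut max_chars t (m + 1) rest = tnlCut max_chars t m rest + 1 := by
  intro rest
  induction rest with
  | nil => intro t m; rfl
  | cons x xs ih =>
    intro t m
    simp only [tnlCut]
    split
    · rfl
    · exact ih _ _

theorem tnlLoopA_eq (max_chars : Int) : ∀ (rest : List String) (result : List Char),
    tnlLoopA max_chars result rest =
      (let r := tnlCut max_chars (result.length : Int) 0 rest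
       if r = rest.length then result ++ tnlFlat rest
       else result ++ tnlFlat (rest.take r) ++ " … and ".toList
            ++ PySem.Int.toChars ((rest.length : Int) - r) ++ " more".toList) := by
  intro rest
  induction rest with
  | nil => intro result; simp [tnlLoopA, tnlCut, tnlFlat]
  | cons name rest ih =>
    intro result
    simp only [tnlLoopA, tnlCut]
    have hlen : ((result ++ [',', ' '] ++ name.toList).length : Int)
        = (result.length : Int) + 2 + (name.toList.length : Int) := by
      simp [List.length_append]; ring
    by_cases hgt : (result.length : Int) + 2 + (name.toList.length : Int) > max_chars
    · rw [if_pos (by rw [hlen]; exact hgt), if_pos hgt]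
      simp only [List.length_cons]
      rw [if_neg (by omega)]
      simp only [List.take_zero, tnlFlat, List.flatMap_nil, List.append_nil]
      simp
    · rw [if_neg (by rw [hlen]; exact hgt), if_neg hgt]
      rw [ih (result ++ [',', ' '] ++ name.toList)]
      rw [tnlCut_shift, hlen]
      set r' := tnlCut max_chars ((result.length : Int) + 2 + (name.toList.length : Int)) 0 rest with hr'
      simp only [List.length_cons]
      by_cases hr : r' = rest.length
      · rw [if_pos hr, if_pos (by omega)]
        simp [tnlFlat, List.append_assoc]
      · rw [if_neg hr, if_neg (by omega)]
        have hc : ((rest.length + 1 : Nat) : Int) - ((r' + 1 : Nat) : Int)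
            = (rest.length : Int) - (r' : Nat) := by push_cast; ring
        simp only [List.take_succ_cons, tnlFlat, List.flatMap_cons, hc]
        simp [List.append_assoc]

-- ===== VERDICT (by name: the statement is the Claim_ definition above) =====
theorem truncate_name_list_spec : Claim_equal_truncate_name_list := by
  intro names max_chars _dom
  unfold Spec_truncate_name_list
  cases names with
  | nil => rfl
  | cons n0 rest =>
    simp only [truncate_name_list, truncate_name_list_alt]
    rw [tnlLoopA_eq]
    simp only [List.map_cons]
    by_cases h : tnlCut max_chars ((n0.toList.length : Nat) : Int) 0 rest = rest.length
    · simp only [if_pos h, tnl_join_eq]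
    · rw [if_neg h, if_neg h]
      simp only [List.take_succ_cons, List.map_cons, tnl_join_eq]
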